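-- pv_equiv track=rewrite | github.com/Singhanji/python-DSA | advance_DSA/binary_search/LAST_occurance_of_index_Brute_force.py | solve
-- ===== SOURCE A (Python) =====
-- def solve(A,k):
--     idx = -1
--     n = len(A)
--     for i in range(n-1,-1,-1):
--         if A[i] == k:
--             idx = i
--             return idx
--     return idx
-- ===== SOURCE B (Python) =====
-- def solve(A, k):
--     idx = -1
--     for i, x in enumerate(A):
--         if x == k:
--             idx = i
--     return idx
-- ===== Notes on version B (the rewrite author's own statement) =====
-- stated objective: alternative
-- what changed: A scans backwards and early-returns at the first match from the end; B makes a single forward pass over enumerate(A), overwriting an accumulator on every match, so the last match wins and there is no early return or reversed index range.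
import Mathlib
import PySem

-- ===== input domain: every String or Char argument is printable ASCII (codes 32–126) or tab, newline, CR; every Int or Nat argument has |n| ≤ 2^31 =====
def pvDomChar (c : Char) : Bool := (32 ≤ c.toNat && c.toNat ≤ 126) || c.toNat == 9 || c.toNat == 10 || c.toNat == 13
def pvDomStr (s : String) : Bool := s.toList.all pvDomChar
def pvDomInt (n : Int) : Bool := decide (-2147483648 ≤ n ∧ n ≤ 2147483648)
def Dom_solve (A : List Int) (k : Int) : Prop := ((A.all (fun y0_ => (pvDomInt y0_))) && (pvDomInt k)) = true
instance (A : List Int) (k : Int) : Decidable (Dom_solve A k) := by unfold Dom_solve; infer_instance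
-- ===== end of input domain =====

-- B replaces A's backward scan with early return by a single forward pass that
-- overwrites an accumulator on every match (alternative decomposition, same cost).

-- ===== PORT A =====
-- the 'for i in range(n-1,-1,-1)' loop with its early 'return idx' on a match
def solveGo (A : List Int) (k : Int) : List Int → Int
  | [] => -1
  | i :: rest =>
    match PySem.List.pyGet? A i with
    | some v => if v == k then i else solveGo A k rest
    | none => -1   -- IndexError; unreachable, every i produced by the range is in bounds

def solve (A : List Int) (k : Int) : Int :=
  solveGo A k (PySem.List.pyRange ((A.length : Int) - 1) (-1) (-1))

-- ===== PORT B =====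
def solve_alt (A : List Int) (k : Int) : Int :=
  (PySem.List.enumerate A 0).foldl (fun idx p => if p.2 == k then p.1 else idx) (-1)

-- ===== PRECONDITION & SPEC =====
def Spec_solve (A : List Int) (k : Int) (out : Int) : Prop := out = solve_alt A k
instance (A : List Int) (k : Int) (out : Int) : Decidable (Spec_solve A k out) := by unfold Spec_solve; infer_instance

-- ===== CLAIM (what is proved, stated in full; the proofs are below) =====
def Claim_equal_solve : Prop := ∀ (A : List Int) (k : Int), Dom_solve A k → Spec_solve A k (solve A k)

-- ===== LEMMAS AND PROOFS =====

-- solveGo only looks at A through pyGet? at the listed indices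
theorem solveGo_congr (A B : List Int) (k : Int) (l : List Int)
    (h : ∀ i ∈ l, PySem.List.pyGet? A i = PySem.List.pyGet? B i) :
    solveGo A k l = solveGo B k l := by
  induction l with
  | nil => rfl
  | cons i rest ih =>
    rw [solveGo, solveGo, h i (by simp)]
    cases hv : PySem.List.pyGet? B i with
    | none => rfl
    | some v =>
      by_cases hvk : v == k
      · simp [hvk]
      · simp only [hvk, if_false, Bool.false_eq_true]
        exact ih (fun j hj => h j (by simp [hj]))

-- A-side step: appending one element to the list
theorem solve_append (A : List Int) (x k : Int) :
    solve (A ++ [x]) k = if x == k then (A.length : Int) else solve A k := by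
  unfold solve
  have hlen : ((A ++ [x]).length : Int) - 1 = (A.length : Int) := by
    simp
  rw [hlen, PySem.List.pyRange_neg_one_cons (by omega)]
  simp only [solveGo, PySem.List.pyGet?_append_length]
  by_cases hx : x == k
  · simp [hx]
  · simp only [hx, Bool.false_eq_true, if_false]
    apply solveGo_congr
    intro i hi
    rw [PySem.List.mem_pyRange_neg_one] at hi
    have h0 : 0 ≤ i := by omega
    have h1 : i < (A.length : Int) := by omega
    rw [PySem.List.pyGet?_of_nonneg (A ++ [x]) h0, PySem.List.pyGet?_of_nonneg A h0]
    have : i.toNat < A.length := by omega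
    rw [List.getElem?_append_left this]

-- B-side step: appending one element to the list
theorem solve_alt_append (A : List Int) (x k : Int) :
    solve_alt (A ++ [x]) k = if x == k then (A.length : Int) else solve_alt A k := by
  unfold solve_alt
  rw [PySem.List.enumerate_append]
  simp [PySem.List.enumerate]

theorem solve_eq_alt (A : List Int) (k : Int) : solve A k = solve_alt A k := by
  induction A using List.reverseRecOn with
  | nil =>
    unfold solve solve_alt
    rw [PySem.List.pyRange_neg_one_eq_nil (by simp)]
    rfl
  | append_singleton A x ih =>
    rw [solve_append, solve_alt_append, ih]

-- ===== VERDICT (by name: the statement is the Claim_ definition above) =====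
theorem solve_spec : Claim_equal_solve := by
  intro A k _
  unfold Spec_solve
  exact solve_eq_alt A k
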